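-- pv_equiv track=rewrite | github.com/Maetran/RollTheDice | app/main.py | next_turn
-- ===== SOURCE A (Python) =====
-- from typing import Dict, Any
--
-- GameDict = Dict[str, Any]
--
-- def next_turn(g: GameDict, current_pid: str | None) -> str | None:
--     """Liefert die ID des nächsten Spielers in der Reihenfolge (Ring).
--
--     Args:
--         g (GameDict): Spielzustand
--         current_pid (str | None): ID des aktuellen Spielers
--
--     Returns:
--         str | None: ID des nächsten Spielers oder None, wenn keine Spieler vorhanden sind
--     """
--     ids = [p["id"] for p in g["_players"]]
--     if not ids:
--         return None
--     if current_pid in ids: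
--         i = (ids.index(current_pid) + 1) % len(ids)
--         return ids[i]
--     return ids[0]
-- ===== SOURCE B (Python) =====
-- def next_turn(g, current_pid):
--     """Single pass over g["_players"]: remember the first id, flag the match,
--     and return the id seen right after the match; fall back to the first id."""
--     first = None
--     have_first = False
--     matched = False
--     for p in g["_players"]:
--         pid = p["id"]
--         if matched:
--             return pid
--         if not have_first:
--             first = pid
--             have_first = True
--         if pid == current_pid:
--             matched = True
--     if not have_first:
--         return None
--     return first
-- ===== Notes on version B (the rewrite author's own statement) =====
-- stated objective: simpler
-- what changed: B replaces A's build-the-id-list + membership test + .index-then-modular-lookup with one early-returning scan over the players that tracks the first id and a matched flag.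
import Mathlib
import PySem

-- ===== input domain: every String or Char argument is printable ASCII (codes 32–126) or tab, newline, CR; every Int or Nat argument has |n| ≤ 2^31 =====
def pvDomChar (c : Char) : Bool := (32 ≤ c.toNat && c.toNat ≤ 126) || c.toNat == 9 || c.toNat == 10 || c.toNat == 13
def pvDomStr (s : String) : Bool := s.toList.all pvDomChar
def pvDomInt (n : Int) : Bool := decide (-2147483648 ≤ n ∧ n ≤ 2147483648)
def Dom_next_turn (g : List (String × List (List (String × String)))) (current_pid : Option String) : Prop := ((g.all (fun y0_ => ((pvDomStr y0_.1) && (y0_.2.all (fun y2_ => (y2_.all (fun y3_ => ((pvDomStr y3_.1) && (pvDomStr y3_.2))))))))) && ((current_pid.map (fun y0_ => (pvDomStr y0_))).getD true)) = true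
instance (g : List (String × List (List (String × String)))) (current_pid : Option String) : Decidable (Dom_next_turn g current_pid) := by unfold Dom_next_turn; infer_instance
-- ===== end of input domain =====

-- B replaces A's id-list build + membership + .index-then-modular-lookup with one early-returning
-- scan tracking the first id and a matched flag (objective: simpler; equivalence of return values).

-- ===== PORT A =====
-- g["_players"] / p["id"] are first-match lookups; Pre_ guarantees both succeed (else Python raises KeyError).
def next_turn (g : List (String × List (List (String × String)))) (current_pid : Option String) : Option String :=
  match g.lookup "_players" with
  | none => none  -- KeyError in Python; outside Pre_
  | some players =>
    let ids := players.map (fun p => p.lookup "id")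
    if ids = [] then none
    else if current_pid ∈ ids then
      match PySem.List.index? ids current_pid with
      | none => none  -- unreachable: current_pid ∈ ids
      | some i => ids.getD ((i + 1) % ids.length) none  -- (i+1) % len is in range, so getD is exact
    else ids.getD 0 none

-- ===== PORT B =====
def nextTurnAltLoop (players : List (List (String × String))) (current_pid : Option String)
    (first : Option String) (haveFirst matched : Bool) : Option String :=
  match players with
  | [] => if haveFirst then first else none
  | p :: rest =>
    let pid := p.lookup "id"
    if matched then pid
    else
      nextTurnAltLoop rest current_pid (if haveFirst then first else pid) true (pid == current_pid)

def next_turn_alt (g : List (String × List (List (String × String)))) (current_pid : Option String) : Option String :=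
  match g.lookup "_players" with
  | none => none  -- KeyError in Python; outside Pre_
  | some players => nextTurnAltLoop players current_pid none false false

-- ===== PRECONDITION & SPEC =====
-- Pre_ excludes exactly the inputs where Python raises KeyError (no "_players" key, or a player
-- without an "id" key); both A and B raise there.
def Pre_next_turn (g : List (String × List (List (String × String)))) (current_pid : Option String) : Prop :=
  (g.lookup "_players").isSome = true ∧
  ∀ p ∈ (g.lookup "_players").getD [], (p.lookup "id").isSome = true
instance (g : List (String × List (List (String × String)))) (current_pid : Option String) : Decidable (Pre_next_turn g current_pid) := by unfold Pre_next_turn; infer_instance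
def pvWitness_next_turn : (List (String × List (List (String × String)))) × Option String :=
  ([("_players", [[("id", "a")], [("id", "b")]])], some "a")

def Spec_next_turn (g : List (String × List (List (String × String)))) (current_pid : Option String) (out : Option String) : Prop := out = next_turn_alt g current_pid
instance (g : List (String × List (List (String × String)))) (current_pid : Option String) (out : Option String) : Decidable (Spec_next_turn g current_pid out) := by unfold Spec_next_turn; infer_instance

-- ===== CLAIM (what is proved, stated in full; the proofs are below) =====
def Claim_equal_next_turn : Prop := ∀ (g : List (String × List (List (String × String)))) (current_pid : Option String), Dom_next_turn g current_pid → Pre_next_turn g current_pid → Spec_next_turn g current_pid (next_turn g current_pid)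

-- ===== LEMMAS AND PROOFS =====

-- After the match has fired, the loop returns the very next id (or `first` if none is left).
theorem loop_matched (ps : List (List (String × String))) (cp fst : Option String) :
    nextTurnAltLoop ps cp fst true true = match ps with | [] => fst | q :: _ => q.lookup "id" := by
  cases ps <;> simp [nextTurnAltLoop]

-- Before the match, the loop is governed by the position of cp in the remaining ids.
theorem loop_unmatched (ps : List (List (String × String))) (cp fst : Option String) :
    nextTurnAltLoop ps cp fst true false =
      match PySem.List.index? (ps.map (fun p => p.lookup "id")) cp with
      | none => fst
      | some i => if i + 1 < ps.length then (ps.map (fun p => p.lookup "id")).getD (i + 1) none else fst := by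
  induction ps generalizing fst with
  | nil => simp [nextTurnAltLoop, PySem.List.index?]
  | cons q qs ih =>
    by_cases h : q.lookup "id" = cp
    · rw [show nextTurnAltLoop (q :: qs) cp fst true false
            = nextTurnAltLoop qs cp fst true true by
            simp [nextTurnAltLoop, h]]
      rw [loop_matched]
      rw [show (q :: qs).map (fun p => p.lookup "id") = cp :: qs.map (fun p => p.lookup "id") by simp [h]]
      rw [PySem.List.index?_cons_self]
      cases qs with
      | nil => simp
      | cons r rs => simp
    · rw [show nextTurnAltLoop (q :: qs) cp fst true false
            = nextTurnAltLoop qs cp fst true ((q.lookup "id") == cp) by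
            simp [nextTurnAltLoop]]
      rw [show ((q.lookup "id") == cp) = false from beq_eq_false_iff_ne.mpr h]
      rw [ih]
      rw [show (q :: qs).map (fun p => p.lookup "id") = q.lookup "id" :: qs.map (fun p => p.lookup "id") by simp]
      rw [PySem.List.index?_cons_of_ne _ h]
      cases hix : PySem.List.index? (qs.map (fun p => p.lookup "id")) cp with
      | none => simp
      | some j =>
        simp only [Option.map_some]
        by_cases hj : j + 1 < qs.length
        · rw [if_pos hj, if_pos (by simpa using Nat.succ_lt_succ hj)]
          simp [List.getD]
        · rw [if_neg hj, if_neg (by simp only [List.length_cons]; omega)]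

theorem next_turn_eq (g : List (String × List (List (String × String)))) (cp : Option String) :
    next_turn g cp = next_turn_alt g cp := by
  unfold next_turn next_turn_alt
  cases hg : g.lookup "_players" with
  | none => rfl
  | some players =>
    cases players with
    | nil => simp [nextTurnAltLoop]
    | cons p rest =>
      simp only []
      have hne : (p :: rest).map (fun q => q.lookup "id") ≠ [] := by simp
      rw [if_neg hne]
      rw [show nextTurnAltLoop (p :: rest) cp none false false
            = nextTurnAltLoop rest cp (p.lookup "id") true ((p.lookup "id") == cp) by
            simp [nextTurnAltLoop]]
      by_cases hp : p.lookup "id" = cp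
      · -- cp is the head id: A takes index 0, B is already matched
        rw [show ((p.lookup "id") == cp) = true by simp [hp]]
        rw [loop_matched]
        have hmem : cp ∈ (p :: rest).map (fun q => q.lookup "id") := by simp [← hp]
        rw [if_pos hmem]
        rw [show (p :: rest).map (fun q => q.lookup "id") = cp :: rest.map (fun q => q.lookup "id") by simp [hp]]
        rw [PySem.List.index?_cons_self]
        cases rest with
        | nil => simp [hp]
        | cons r rs =>
          simp only []
          rw [show (0 + 1) % (cp :: (r :: rs).map (fun q => q.lookup "id")).length = 1 by
            simp [Nat.mod_eq_of_lt]]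
          simp
      · rw [show ((p.lookup "id") == cp) = false by simp [hp]]
        rw [loop_unmatched]
        by_cases hmem : cp ∈ rest.map (fun q => q.lookup "id")
        · -- cp occurs later in the ring
          have hmem' : cp ∈ (p :: rest).map (fun q => q.lookup "id") := by simp [hmem]
          rw [if_pos hmem']
          rw [show (p :: rest).map (fun q => q.lookup "id")
                = p.lookup "id" :: rest.map (fun q => q.lookup "id") by simp]
          rw [PySem.List.index?_cons_of_ne _ hp]
          obtain ⟨j, hj⟩ := Option.isSome_iff_exists.mp
            ((PySem.List.index?_isSome_iff _ _).mpr hmem)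
          rw [hj]
          obtain ⟨hjlt, -, -⟩ := PySem.List.getElem_of_index?_eq_some hj
          simp only [Option.map_some, List.length_map] at hjlt ⊢
          by_cases hlast : j + 1 < rest.length
          · rw [if_pos hlast]
            rw [Nat.mod_eq_of_lt (by simp; omega)]
            simp [List.getD]
          · -- cp is the last id: wrap to the head
            have hje : j + 1 = rest.length := by omega
            rw [if_neg hlast]
            rw [show j + 1 + 1 = (p.lookup "id" :: rest.map (fun q => q.lookup "id")).length by
              simp [hje]]
            simp [List.getD]
        · -- cp absent: A falls back to ids[0], B to first
          have hmem' : cp ∉ (p :: rest).map (fun q => q.lookup "id") := by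
            simp only [List.map_cons, List.mem_cons, not_or]
            exact ⟨fun h => hp h.symm, hmem⟩
          rw [if_neg hmem']
          rw [(PySem.List.index?_eq_none_iff _ _).mpr hmem]
          simp [List.getD]

-- ===== VERDICT (by name: the statement is the Claim_ definition above) =====
theorem next_turn_spec : Claim_equal_next_turn := by
  intro g cp _ _
  unfold Spec_next_turn
  exact next_turn_eq g cp
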